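-- pv_equiv track=rewrite | github.com/GannamaneniMeghana/CineMatrix_movie_recommendation | app.py | check_attribute
-- ===== SOURCE A (Python) =====
-- def check_attribute(movie, category):
--     genres = movie.get('genre', '').lower()
--
--     if category == "slow-paced":
--         slow_keywords = ['drama', 'romance', 'biography', 'history', 'documentary', 'arts']
--         fast_keywords = ['action', 'thriller', 'adventure', 'horror', 'sci-fi', 'mystery', 'survival']
--         is_slow = any(k in genres for k in slow_keywords)
--         is_fast = any(k in genres for k in fast_keywords)
--         return is_slow and not is_fast
--
--     elif category == "fast-paced":
--         keywords = ['action', 'thriller', 'adventure', 'sci-fi', 'horror', 'mystery']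
--         return any(k in genres for k in keywords)
--
--     elif category == "simple-plot":
--         keywords = ['comedy', 'family', 'animation', 'musical', 'romance']
--         complex_keywords = ['sci-fi', 'mystery', 'crime', 'thriller', 'psychological']
--         is_simple = any(k in genres for k in keywords)
--         is_complex = any(k in genres for k in complex_keywords)
--         return is_simple and not is_complex
--
--     elif category == "complex-plot":
--         keywords = ['sci-fi', 'mystery', 'crime', 'thriller', 'psychological', 'suspense']
--         return any(k in genres for k in keywords)
--
--     elif category == "light-theme":
--         keywords = ['comedy', 'family', 'animation', 'musical', 'fantasy']
--         dark_keywords = ['horror', 'crime', 'mystery', 'thriller', 'war', 'dark']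
--         is_light = any(k in genres for k in keywords)
--         is_dark = any(k in genres for k in dark_keywords)
--         return is_light and not is_dark
--
--     elif category == "dark-theme":
--         keywords = ['horror', 'crime', 'mystery', 'thriller', 'war', 'dark', 'noir']
--         return any(k in genres for k in keywords)
--
--     elif category == "watch-myself":
--         # Introspective or deep genres
--         keywords = ['drama', 'biography', 'documentary', 'history', 'war']
--         return any(k in genres for k in keywords)
--
--     elif category == "watch-friends":
--         # Fun, exciting, or scary genres
--         keywords = ['action', 'comedy', 'horror', 'adventure', 'sport', 'musical']
--         return any(k in genres for k in keywords)
--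
--     return False
-- ===== SOURCE B (Python) =====
-- # Text-driven rewrite: a single scan over the genre string collects the set of matched
-- # keywords once, then the category's answer is two set-disjointness tests against a table.
-- _KEYWORDS = ['drama', 'romance', 'biography', 'history', 'documentary', 'arts',
--              'action', 'thriller', 'adventure', 'horror', 'sci-fi', 'mystery',
--              'survival', 'comedy', 'family', 'animation', 'musical', 'crime',
--              'psychological', 'suspense', 'fantasy', 'war', 'dark', 'noir', 'sport']
--
-- _TABLE = {
--     "slow-paced": ({'drama', 'romance', 'biography', 'history', 'documentary', 'arts'},
--                    {'action', 'thriller', 'adventure', 'horror', 'sci-fi', 'mystery', 'survival'}),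
--     "fast-paced": ({'action', 'thriller', 'adventure', 'sci-fi', 'horror', 'mystery'}, set()),
--     "simple-plot": ({'comedy', 'family', 'animation', 'musical', 'romance'},
--                     {'sci-fi', 'mystery', 'crime', 'thriller', 'psychological'}),
--     "complex-plot": ({'sci-fi', 'mystery', 'crime', 'thriller', 'psychological', 'suspense'}, set()),
--     "light-theme": ({'comedy', 'family', 'animation', 'musical', 'fantasy'},
--                     {'horror', 'crime', 'mystery', 'thriller', 'war', 'dark'}),
--     "dark-theme": ({'horror', 'crime', 'mystery', 'thriller', 'war', 'dark', 'noir'}, set()),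
--     "watch-myself": ({'drama', 'biography', 'documentary', 'history', 'war'}, set()),
--     "watch-friends": ({'action', 'comedy', 'horror', 'adventure', 'sport', 'musical'}, set()),
-- }
--
-- def check_attribute(movie, category):
--     entry = _TABLE.get(category)
--     if entry is None:
--         return False
--     positives, negatives = entry
--     genres = movie.get('genre', '').lower()
--     found = set()
--     for i in range(len(genres) + 1):
--         for k in _KEYWORDS:
--             if genres.startswith(k, i):
--                 found.add(k)
--     return (not positives.isdisjoint(found)) and negatives.isdisjoint(found)
-- ===== Notes on version B (the rewrite author's own statement) =====
-- stated objective: alternative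
-- what changed: Instead of testing each branch's keywords by substring membership, B scans the genre string once position by position, collecting the set of all matched keywords, and then answers the category by two set-disjointness tests against a category table.
import Mathlib
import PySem

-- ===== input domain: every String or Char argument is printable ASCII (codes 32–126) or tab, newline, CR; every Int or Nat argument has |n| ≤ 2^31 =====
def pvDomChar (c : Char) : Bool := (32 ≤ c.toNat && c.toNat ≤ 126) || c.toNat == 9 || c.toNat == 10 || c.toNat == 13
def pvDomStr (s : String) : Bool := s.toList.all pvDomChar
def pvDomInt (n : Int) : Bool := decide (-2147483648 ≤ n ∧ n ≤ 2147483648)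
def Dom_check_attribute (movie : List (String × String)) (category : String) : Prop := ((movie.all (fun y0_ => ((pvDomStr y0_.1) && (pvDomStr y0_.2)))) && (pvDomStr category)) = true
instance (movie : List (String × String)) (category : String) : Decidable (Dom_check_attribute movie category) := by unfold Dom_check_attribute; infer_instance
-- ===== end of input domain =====

-- B replaces A's per-branch substring tests by one text-driven scan of the genre string that
-- collects the set of matched keywords, then two set-disjointness tests (objective: alternative).

-- ===== PORT A =====
def check_attribute (movie : List (String × String)) (category : String) : Bool :=
  let genres := PySem.Str.lower ((PySem.Dict.mk movie).getD "genre" "")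
  if category == "slow-paced" then
    let slow_keywords := ["drama", "romance", "biography", "history", "documentary", "arts"]
    let fast_keywords := ["action", "thriller", "adventure", "horror", "sci-fi", "mystery", "survival"]
    let is_slow := slow_keywords.any (fun k => PySem.Str.isIn k genres)
    let is_fast := fast_keywords.any (fun k => PySem.Str.isIn k genres)
    is_slow && !is_fast
  else if category == "fast-paced" then
    let keywords := ["action", "thriller", "adventure", "sci-fi", "horror", "mystery"]
    keywords.any (fun k => PySem.Str.isIn k genres)
  else if category == "simple-plot" then
    let keywords := ["comedy", "family", "animation", "musical", "romance"]
    let complex_keywords := ["sci-fi", "mystery", "crime", "thriller", "psychological"]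
    let is_simple := keywords.any (fun k => PySem.Str.isIn k genres)
    let is_complex := complex_keywords.any (fun k => PySem.Str.isIn k genres)
    is_simple && !is_complex
  else if category == "complex-plot" then
    let keywords := ["sci-fi", "mystery", "crime", "thriller", "psychological", "suspense"]
    keywords.any (fun k => PySem.Str.isIn k genres)
  else if category == "light-theme" then
    let keywords := ["comedy", "family", "animation", "musical", "fantasy"]
    let dark_keywords := ["horror", "crime", "mystery", "thriller", "war", "dark"]
    let is_light := keywords.any (fun k => PySem.Str.isIn k genres)
    let is_dark := dark_keywords.any (fun k => PySem.Str.isIn k genres)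
    is_light && !is_dark
  else if category == "dark-theme" then
    let keywords := ["horror", "crime", "mystery", "thriller", "war", "dark", "noir"]
    keywords.any (fun k => PySem.Str.isIn k genres)
  else if category == "watch-myself" then
    let keywords := ["drama", "biography", "documentary", "history", "war"]
    keywords.any (fun k => PySem.Str.isIn k genres)
  else if category == "watch-friends" then
    let keywords := ["action", "comedy", "horror", "adventure", "sport", "musical"]
    keywords.any (fun k => PySem.Str.isIn k genres)
  else
    false

-- ===== PORT B =====
def pvKeywords : List String :=
  ["drama", "romance", "biography", "history", "documentary", "arts",
   "action", "thriller", "adventure", "horror", "sci-fi", "mystery",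
   "survival", "comedy", "family", "animation", "musical", "crime",
   "psychological", "suspense", "fantasy", "war", "dark", "noir", "sport"]

def pvTable : PySem.Dict String (PySem.Set String × PySem.Set String) := PySem.Dict.mk
  [ ("slow-paced", (["drama", "romance", "biography", "history", "documentary", "arts"],
                    ["action", "thriller", "adventure", "horror", "sci-fi", "mystery", "survival"])),
    ("fast-paced", (["action", "thriller", "adventure", "sci-fi", "horror", "mystery"], [])),
    ("simple-plot", (["comedy", "family", "animation", "musical", "romance"],
                     ["sci-fi", "mystery", "crime", "thriller", "psychological"])),
    ("complex-plot", (["sci-fi", "mystery", "crime", "thriller", "psychological", "suspense"], [])),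
    ("light-theme", (["comedy", "family", "animation", "musical", "fantasy"],
                     ["horror", "crime", "mystery", "thriller", "war", "dark"])),
    ("dark-theme", (["horror", "crime", "mystery", "thriller", "war", "dark", "noir"], [])),
    ("watch-myself", (["drama", "biography", "documentary", "history", "war"], [])),
    ("watch-friends", (["action", "comedy", "horror", "adventure", "sport", "musical"], [])) ]

-- the scan loop of Source B: for i in range(len(genres)+1): for k in _KEYWORDS: if genres.startswith(k, i): found.add(k)
def pvFound (genres : String) : PySem.Set String :=
  (List.range (genres.toList.length + 1)).foldl
    (fun found i =>
      pvKeywords.foldl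
        (fun found k =>
          if PySem.Chars.startswith (genres.toList.drop i) k.toList then PySem.Set.add found k
          else found)
        found)
    PySem.Set.empty

def check_attribute_alt (movie : List (String × String)) (category : String) : Bool :=
  match pvTable.get? category with
  | none => false
  | some (positives, negatives) =>
    let genres := PySem.Str.lower ((PySem.Dict.mk movie).getD "genre" "")
    let found := pvFound genres
    (!(PySem.Set.isdisjoint positives found)) && PySem.Set.isdisjoint negatives found

-- ===== PRECONDITION & SPEC =====
def Spec_check_attribute (movie : List (String × String)) (category : String) (out : Bool) : Prop := out = check_attribute_alt movie category
instance (movie : List (String × String)) (category : String) (out : Bool) : Decidable (Spec_check_attribute movie category out) := by unfold Spec_check_attribute; infer_instance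

-- ===== CLAIM =====
def Claim_equal_check_attribute : Prop := ∀ (movie : List (String × String)) (category : String), Dom_check_attribute movie category → Spec_check_attribute movie category (check_attribute movie category)

-- ===== LEMMAS AND PROOFS =====

-- membership in the inner keyword fold
lemma mem_inner_fold (ks : List String) (s : PySem.Set String) (cs : List Char) (x : String) :
    x ∈ ks.foldl
        (fun found k => if PySem.Chars.startswith cs k.toList then PySem.Set.add found k else found)
        s
      ↔ x ∈ s ∨ (x ∈ ks ∧ PySem.Chars.startswith cs x.toList = true) := by
  induction ks generalizing s with
  | nil => simp
  | cons k ks ih =>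
    simp only [List.foldl_cons]
    by_cases h : PySem.Chars.startswith cs k.toList = true
    · rw [if_pos h, ih]
      simp only [PySem.Set.mem_add, List.mem_cons]
      constructor
      · rintro (⟨hs | rfl⟩ | ⟨hk, hp⟩)
        · exact Or.inl hs
        · exact Or.inr ⟨Or.inl rfl, h⟩
        · exact Or.inr ⟨Or.inr hk, hp⟩
      · rintro (hs | ⟨(rfl | hk), hp⟩)
        · exact Or.inl (Or.inl hs)
        · exact Or.inl (Or.inr rfl)
        · exact Or.inr ⟨hk, hp⟩
    · rw [if_neg h, ih]
      simp only [List.mem_cons]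
      constructor
      · rintro (hs | ⟨hk, hp⟩)
        · exact Or.inl hs
        · exact Or.inr ⟨Or.inr hk, hp⟩
      · rintro (hs | ⟨(rfl | hk), hp⟩)
        · exact Or.inl hs
        · exact absurd hp h
        · exact Or.inr ⟨hk, hp⟩

-- membership in the outer position fold
lemma mem_outer_fold (L : List ℕ) (s : PySem.Set String) (cs : List Char) (x : String) :
    x ∈ L.foldl
        (fun found i =>
          pvKeywords.foldl
            (fun found k =>
              if PySem.Chars.startswith (cs.drop i) k.toList then PySem.Set.add found k else found)
            found)
        s
      ↔ x ∈ s ∨ (x ∈ pvKeywords ∧ ∃ i ∈ L, PySem.Chars.startswith (cs.drop i) x.toList = true) := by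
  induction L generalizing s with
  | nil => simp
  | cons i L ih =>
    simp only [List.foldl_cons, ih, mem_inner_fold, List.mem_cons]
    constructor
    · rintro ((hs | ⟨hk, hp⟩) | ⟨hk, j, hj, hp⟩)
      · exact Or.inl hs
      · exact Or.inr ⟨hk, i, Or.inl rfl, hp⟩
      · exact Or.inr ⟨hk, j, Or.inr hj, hp⟩
    · rintro (hs | ⟨hk, j, (rfl | hj), hp⟩)
      · exact Or.inl (Or.inl hs)
      · exact Or.inl (Or.inr ⟨hk, hp⟩)
      · exact Or.inr ⟨hk, j, hj, hp⟩

lemma mem_pvFound (genres : String) (x : String) :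
    x ∈ pvFound genres
      ↔ x ∈ pvKeywords ∧
        ∃ i ∈ List.range (genres.toList.length + 1),
          PySem.Chars.startswith (genres.toList.drop i) x.toList = true := by
  unfold pvFound
  rw [mem_outer_fold]
  simp [PySem.Set.empty]

-- a keyword is collected by the scan iff it is a substring (keywords are nonempty)
lemma mem_pvFound_iff_isIn (genres k : String) (hk : k ∈ pvKeywords) (hne : k.toList ≠ []) :
    k ∈ pvFound genres ↔ PySem.Str.isIn k genres = true := by
  rw [mem_pvFound]
  rw [PySem.Str.isIn_iff_infix, ← PySem.Chars.isIn_iff_infix,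
    ← PySem.Chars.exists_prefix_drop_iff_isIn]
  constructor
  · rintro ⟨-, i, -, hp⟩
    exact ⟨i, (PySem.Chars.startswith_iff _ _).mp hp⟩
  · rintro ⟨j, hp⟩
    refine ⟨hk, min j genres.toList.length, ?_, ?_⟩
    · simp only [List.mem_range]
      omega
    · rw [PySem.Chars.startswith_iff]
      by_cases h : j ≤ genres.toList.length
      · rwa [min_eq_left h]
      · exfalso
        rw [List.drop_eq_nil_of_le (by omega)] at hp
        exact hne (List.prefix_nil.mp hp)

-- the two disjointness tests of B, rewritten as A's any-tests
lemma isdisjoint_pvFound (P : List String) (genres : String)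
    (h : ∀ k ∈ P, k ∈ pvKeywords ∧ k.toList ≠ []) :
    PySem.Set.isdisjoint P (pvFound genres)
      = !(P.any (fun k => PySem.Str.isIn k genres)) := by
  rw [Bool.eq_iff_iff, PySem.Set.isdisjoint_iff]
  simp only [Bool.not_eq_true', List.any_eq_false]
  constructor
  · intro hd k hkP hIs
    exact hd k hkP ((mem_pvFound_iff_isIn genres k (h k hkP).1 (h k hkP).2).mpr hIs)
  · intro hd k hkP hmem
    exact absurd ((mem_pvFound_iff_isIn genres k (h k hkP).1 (h k hkP).2).mp hmem)
      (by simpa using hd k hkP)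

-- B's branch value, rewritten into A's any-shape
lemma alt_branch (movie : List (String × String)) (cat : String) (P N : List String)
    (hget : pvTable.get? cat = some (P, N))
    (hP : ∀ k ∈ P, k ∈ pvKeywords ∧ k.toList ≠ [])
    (hN : ∀ k ∈ N, k ∈ pvKeywords ∧ k.toList ≠ []) :
    check_attribute_alt movie cat
      = ((P.any (fun k => PySem.Str.isIn k (PySem.Str.lower ((PySem.Dict.mk movie).getD "genre" "")))) &&
         !(N.any (fun k => PySem.Str.isIn k (PySem.Str.lower ((PySem.Dict.mk movie).getD "genre" ""))))) := by
  unfold check_attribute_alt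
  rw [hget]
  dsimp only
  rw [isdisjoint_pvFound _ _ hP, isdisjoint_pvFound _ _ hN, Bool.not_not]

-- ===== VERDICT =====
theorem check_attribute_spec : Claim_equal_check_attribute := by
  intro movie category _
  unfold Spec_check_attribute
  by_cases h1 : category = "slow-paced"
  · subst h1
    rw [alt_branch movie "slow-paced" ["drama", "romance", "biography", "history", "documentary", "arts"] ["action", "thriller", "adventure", "horror", "sci-fi", "mystery", "survival"] (by decide) (by decide) (by decide)]
    simp [check_attribute]
  by_cases h2 : category = "fast-paced"
  · subst h2
    rw [alt_branch movie "fast-paced" ["action", "thriller", "adventure", "sci-fi", "horror", "mystery"] [] (by decide) (by decide) (by decide)]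
    simp [check_attribute]
  by_cases h3 : category = "simple-plot"
  · subst h3
    rw [alt_branch movie "simple-plot" ["comedy", "family", "animation", "musical", "romance"] ["sci-fi", "mystery", "crime", "thriller", "psychological"] (by decide) (by decide) (by decide)]
    simp [check_attribute]
  by_cases h4 : category = "complex-plot"
  · subst h4
    rw [alt_branch movie "complex-plot" ["sci-fi", "mystery", "crime", "thriller", "psychological", "suspense"] [] (by decide) (by decide) (by decide)]
    simp [check_attribute]
  by_cases h5 : category = "light-theme"
  · subst h5
    rw [alt_branch movie "light-theme" ["comedy", "family", "animation", "musical", "fantasy"] ["horror", "crime", "mystery", "thriller", "war", "dark"] (by decide) (by decide) (by decide)]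
    simp [check_attribute]
  by_cases h6 : category = "dark-theme"
  · subst h6
    rw [alt_branch movie "dark-theme" ["horror", "crime", "mystery", "thriller", "war", "dark", "noir"] [] (by decide) (by decide) (by decide)]
    simp [check_attribute]
  by_cases h7 : category = "watch-myself"
  · subst h7
    rw [alt_branch movie "watch-myself" ["drama", "biography", "documentary", "history", "war"] [] (by decide) (by decide) (by decide)]
    simp [check_attribute]
  by_cases h8 : category = "watch-friends"
  · subst h8
    rw [alt_branch movie "watch-friends" ["action", "comedy", "horror", "adventure", "sport", "musical"] [] (by decide) (by decide) (by decide)]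
    simp [check_attribute]
  · simp [check_attribute, check_attribute_alt, pvTable, PySem.Dict.get?,
      h1, h2, h3, h4, h5, h6, h7, h8, Ne.symm h1, Ne.symm h2, Ne.symm h3, Ne.symm h4,
      Ne.symm h5, Ne.symm h6, Ne.symm h7, Ne.symm h8]
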